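/- GENERATED by farm/mkstatement.py from design/units.tsv (unit `prog_main.P`) and the assertions of Gif/Spec/Seg_prog_main.lean — do not edit.
   THE STATEMENT of the proof unit `prog_main.P`: segment P of `prog_main` (12 instructions; entries 0x105000;
   exits 0x105042; ranges 0x105000-0x105042)
   takes each of its entry assertions to one of its exit assertions (`Gif.Spec.prog_main.SegP`), given the contracts of its callees.
   What the names mean: ProgX/Base/Spec/Basic.lean (the shared hypotheses), Gif/Spec/Seg_prog_main.lean (the assertions). The theorem to prove:
   `theorem prog_main_P_ok : Gif.Spec.prog_main_P.Statement`. -/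
import Gif.Code
import Gif.Dec.All
import Gif.Labels
import Gif.Spec.Seg_prog_main
namespace Gif.Spec.prog_main_P
open X86 X86.User Asan

/-- The statement of unit `prog_main.P`. -/
def Statement : Prop :=
  ∀ (Lay : Layout) (_hLay : Lay.hi = 0x1000000) (μ : Microarch) (_hμ : UserX.MicroOK μ) (u₀ : State)
    (_hcode : HasCodeNat Lay u₀ Gif.L.prog_main.entry Gif.Code.code_prog_main.nat Gif.L.prog_main.size),
    Gif.Spec.prog_main.SegP Lay μ u₀

end Gif.Spec.prog_main_P
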